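-- pv_equiv track=rewrite | github.com/ankithpatlolla/cp_problems | 10-destructiveshortenlongruns-Python/destructiveshortenlongruns.py | destructiveshortenlongruns
-- ===== SOURCE A (Python) =====
-- def destructiveshortenlongruns(L, k):
--     # Your code goes here
--     count = 1
--     prev = L[0]
--     i = 1
--     while i < len(L):
--         while L[i] == prev:
--             count += 1
--             if count == k:
--                 i -= 1
--                 L.pop(i)
--                 count -= 1
--             if i == len(L) - 1:
--                 break
--             i += 1
--         count = 1
--         prev = L[i]
--         i += 1
--     return L
-- ===== SOURCE B (Python) =====
-- def destructiveshortenlongruns(L, k):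
--     # Single in-place O(n) compaction pass: cap each run of equal elements
--     # at k-1 copies (no cap when k < 2). Raises IndexError on empty L like A.
--     prev = L[0]
--     w = 1
--     count = 1
--     for i in range(1, len(L)):
--         x = L[i]
--         if x == prev:
--             count += 1
--         else:
--             prev = x
--             count = 1
--         if k < 2 or count < k:
--             L[w] = x
--             w += 1
--     del L[w:]
--     return L
-- ===== Notes on version B (the rewrite author's own statement) =====
-- stated objective: simpler
-- what changed: A shortens runs with nested while loops that pop elements out of the middle of the list and back-track the index; B is a single forward pass with a run counter and a write pointer that keeps an element iff k < 2 or its run count is below k, then truncates the tail.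
import Mathlib
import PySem

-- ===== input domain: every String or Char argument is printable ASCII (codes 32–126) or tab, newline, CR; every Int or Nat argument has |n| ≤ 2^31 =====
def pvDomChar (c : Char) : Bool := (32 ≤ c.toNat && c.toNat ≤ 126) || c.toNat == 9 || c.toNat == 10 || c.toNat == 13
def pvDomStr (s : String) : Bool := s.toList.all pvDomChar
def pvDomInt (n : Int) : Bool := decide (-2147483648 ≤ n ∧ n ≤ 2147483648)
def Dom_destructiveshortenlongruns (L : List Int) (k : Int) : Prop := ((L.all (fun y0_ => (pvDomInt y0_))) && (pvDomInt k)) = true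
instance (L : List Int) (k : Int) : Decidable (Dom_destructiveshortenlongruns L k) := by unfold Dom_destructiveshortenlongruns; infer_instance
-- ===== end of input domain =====

-- B replaces A's nested while loops with repeated in-place pops by a single write-pointer
-- compaction pass in one traversal; both Pythons mutate the argument list to the same final
-- contents, and the equivalence proved here is about the returned list of values.

-- ===== PORT A =====
-- A's inner `while L[i] == prev:` loop. State: current list L, count, prev, index i;
-- returns the list and index at which the inner loop stops (mismatch or `break`).
-- The dite guard only makes Python's raising `L[i]` total, `i - 1` is Nat subtraction
-- (1 <= i in every reachable state), and fuel is an upper bound on the number of loop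
-- iterations (each iteration advances i or shortens L; the callers pass enough, as the
-- spec lemmas below prove).
def innerA (k : Int) (fuel : Nat) (L : List Int) (count prev : Int) (i : Nat) : List Int × Nat :=
  match fuel with
  | 0 => (L, i)
  | f + 1 =>
    if h : i < L.length then
      if L[i] = prev then
        -- count += 1
        if count + 1 = k then
          -- i -= 1; L.pop(i); count -= 1
          if i - 1 = (L.eraseIdx (i - 1)).length - 1 then (L.eraseIdx (i - 1), i - 1)  -- break
          else innerA k f (L.eraseIdx (i - 1)) count prev ((i - 1) + 1)
        else
          if i = L.length - 1 then (L, i)                                              -- break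
          else innerA k f L (count + 1) prev (i + 1)
      else (L, i)
    else (L, i)

-- A's outer `while i < len(L):` loop; each iteration runs the inner loop on the current
-- (L, count, prev, i) state and then does `count = 1; prev = L[i]; i += 1`.
def outerA (k : Int) (fuel : Nat) (L : List Int) (count prev : Int) (i : Nat) : List Int :=
  match fuel with
  | 0 => L
  | f + 1 =>
    if i < L.length then
      outerA k f (innerA k (L.length + 1) L count prev i).1 1
        ((innerA k (L.length + 1) L count prev i).1.getD (innerA k (L.length + 1) L count prev i).2 0)
        ((innerA k (L.length + 1) L count prev i).2 + 1)
    else L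

def destructiveshortenlongruns (L : List Int) (k : Int) : List Int :=
  match L with
  | [] => []            -- Python: `prev = L[0]` raises IndexError; excluded by Pre_
  | p :: _ => outerA k (L.length + 1) L 1 p 1

-- ===== PORT B =====
-- Source B's single for-loop: per element update (prev, count), keep the element iff
-- k < 2 or count < k (Source B keeps it by writing it at the write pointer w and finally
-- truncating; the returned list is exactly the sequence of kept elements).
def altLoop (k prev count : Int) : List Int → List Int
  | [] => []
  | x :: rest =>
    let pc := if x = prev then (prev, count + 1) else (x, 1)
    if k < 2 ∨ pc.2 < k then x :: altLoop k pc.1 pc.2 rest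
    else altLoop k pc.1 pc.2 rest

def destructiveshortenlongruns_alt (L : List Int) (k : Int) : List Int :=
  match L with
  | [] => []            -- Python: `prev = L[0]` raises IndexError; excluded by Pre_
  | p :: t => p :: altLoop k p 1 t

-- ===== PRECONDITION & SPEC =====
-- Pre_ excludes only the empty list, on which both A and B raise IndexError at `L[0]`.
def Pre_destructiveshortenlongruns (L : List Int) (k : Int) : Prop := L ≠ []
instance (L : List Int) (k : Int) : Decidable (Pre_destructiveshortenlongruns L k) := by
  unfold Pre_destructiveshortenlongruns; infer_instance
def pvWitness_destructiveshortenlongruns : List Int × Int := ([1, 1, 1, 2, 2], 2)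

def Spec_destructiveshortenlongruns (L : List Int) (k : Int) (out : List Int) : Prop := out = destructiveshortenlongruns_alt L k
instance (L : List Int) (k : Int) (out : List Int) : Decidable (Spec_destructiveshortenlongruns L k out) := by unfold Spec_destructiveshortenlongruns; infer_instance

-- ===== CLAIM (what is proved, stated in full; the proofs are below) =====
def Claim_equal_destructiveshortenlongruns : Prop := ∀ (L : List Int) (k : Int), Dom_destructiveshortenlongruns L k → Pre_destructiveshortenlongruns L k → Spec_destructiveshortenlongruns L k (destructiveshortenlongruns L k)

-- ===== LEMMAS AND PROOFS =====

theorem get_mid (q : List Int) (p x : Int) (r : List Int) :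
    (q ++ p :: x :: r)[q.length + 1]'(by simp) = x := by
  rw [List.getElem_append_right (by omega)]
  simp

theorem erase_mid (q : List Int) (p x : Int) (r : List Int) :
    (q ++ p :: x :: r).eraseIdx q.length = q ++ x :: r := by
  rw [List.eraseIdx_append_of_length_le (by omega)]
  simp

-- one step of the inner loop on a mismatching element: the loop exits at once
theorem step_mismatch (k : Int) (f : Nat) (q : List Int) (prev c x : Int) (r : List Int) (hx : x ≠ prev) :
    innerA k (f + 1) (q ++ prev :: x :: r) c prev (q.length + 1) = (q ++ prev :: x :: r, q.length + 1) := by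
  rw [innerA, dif_pos (by simp)]
  rw [get_mid]
  simp [hx]

-- one step of the inner loop on a matching element, in all four sub-cases
theorem step_match (k : Int) (f : Nat) (q : List Int) (prev c : Int) (r : List Int) :
    innerA k (f + 1) (q ++ prev :: prev :: r) c prev (q.length + 1) =
      if c + 1 = k then
        (if r = [] then (q ++ [prev], q.length)
         else innerA k f (q ++ prev :: r) c prev (q.length + 1))
      else
        (if r = [] then (q ++ [prev, prev], q.length + 1)
         else innerA k f (q ++ prev :: prev :: r) (c + 1) prev (q.length + 2)) := by
  rw [innerA, dif_pos (by simp)]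
  rw [get_mid, if_pos rfl]
  simp only [Nat.add_sub_cancel, erase_mid]
  by_cases hk : c + 1 = k <;> by_cases hr : r = []
  · subst hr; simp [hk]
  · have hr0 : r.length ≠ 0 := fun h => hr (List.length_eq_zero_iff.mp h)
    simp [hk, hr, hr0]
  · subst hr; simp [hk]
  · have hr0 : r.length ≠ 0 := fun h => hr (List.length_eq_zero_iff.mp h)
    have ha : q.length + 1 + 1 = q.length + 2 := by omega
    simp [hk, hr, hr0, ha]

-- unfoldings of one altLoop step (run continues / new run starts)
theorem altLoop_cons_self (k p c : Int) (r : List Int) :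
    altLoop k p c (p :: r) =
      if k < 2 ∨ c + 1 < k then p :: altLoop k p (c + 1) r else altLoop k p (c + 1) r := by
  simp [altLoop]

theorem altLoop_cons_ne (k p c x : Int) (r : List Int) (hx : x ≠ p) :
    altLoop k p c (x :: r) = x :: altLoop k x 1 r := by
  by_cases h : k < 2
  · simp [altLoop, hx, h]
  · have h1 : (1 : Int) < k := by omega
    simp [altLoop, hx, h1]

-- The inner loop described against B's altLoop. countA is A's count (kept copies of
-- prev in the current run, capped below k); countB is B's count (copies seen so far);
-- the disjunction is the coupling invariant between the two counters.
theorem inner_spec (k prev : Int) :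
    ∀ (rest q : List Int) (f : Nat) (countA countB : Int),
      rest.length + 1 ≤ f →
      rest ≠ [] → 1 ≤ countA → (2 ≤ k → countA < k) →
      (countA = countB ∨ (2 ≤ k ∧ countA = k - 1 ∧ k - 1 ≤ countB)) →
      ∃ a b : List Int,
        innerA k f (q ++ prev :: rest) countA prev (q.length + 1) =
          (q ++ prev :: (a ++ b), q.length + a.length + (if b.isEmpty then 0 else 1)) ∧
        a.length + b.length ≤ rest.length ∧
        altLoop k prev countB rest =
          a ++ (match b with | [] => [] | x :: t => x :: altLoop k x 1 t) := by
  intro rest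
  induction rest with
  | nil => intro q f cA cB hf hne; exact absurd rfl hne
  | cons x r ih =>
    intro q f cA cB hf _ h1 h2 hrel
    match f, hf with
    | f + 1, hf =>
    have hfr : r.length + 1 ≤ f := by simp at hf; omega
    by_cases hx : x = prev
    · subst hx
      rw [step_match]
      by_cases hk : cA + 1 = k
      · rw [if_pos hk]
        have hk2 : 2 ≤ k := by omega
        have hcb : k - 1 ≤ cB := by
          rcases hrel with h | ⟨_, h, h'⟩ <;> omega
        have halt : altLoop k x cB (x :: r) = altLoop k x (cB + 1) r := by
          rw [altLoop_cons_self, if_neg (by omega)]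
        by_cases hr : r = []
        · subst hr
          refine ⟨[], [], ?_, by simp, ?_⟩
          · rw [if_pos rfl]; simp
          · rw [halt]; simp [altLoop]
        · rw [if_neg hr]
          obtain ⟨a, b, e1, e2, e3⟩ :=
            ih q f cA (cB + 1) hfr hr h1 h2 (Or.inr ⟨hk2, by omega, by omega⟩)
          refine ⟨a, b, e1, by simp at e2 ⊢; omega, ?_⟩
          rw [halt]; exact e3
      · rw [if_neg hk]
        have hkeep : k < 2 ∨ cA + 1 < k := by
          by_cases h2' : 2 ≤ k
          · right; have := h2 h2'; omega
          · left; omega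
        have hcbeq : cA = cB := by
          rcases hrel with h | ⟨hc2, hc, h'⟩
          · exact h
          · exact absurd (by omega) hk
        subst hcbeq
        have halt : altLoop k x cA (x :: r) = x :: altLoop k x (cA + 1) r := by
          rw [altLoop_cons_self, if_pos hkeep]
        by_cases hr : r = []
        · subst hr
          refine ⟨[x], [], ?_, by simp, ?_⟩
          · rw [if_pos rfl]; simp
          · rw [halt]; simp [altLoop]
        · rw [if_neg hr]
          obtain ⟨a, b, e1, e2, e3⟩ :=
            ih (q ++ [x]) f (cA + 1) (cA + 1) hfr hr (by omega)
              (by intro h2'; rcases hkeep with h | h <;> omega) (Or.inl rfl)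
          have hsh : q ++ [x] ++ x :: r = q ++ x :: x :: r := by simp
          have hl : (q ++ [x]).length + 1 = q.length + 2 := by simp
          rw [hsh, hl] at e1
          refine ⟨x :: a, b, ?_, by simp at e2 ⊢; omega, ?_⟩
          · rw [e1]
            have hL : q ++ [x] ++ x :: (a ++ b) = q ++ x :: (x :: a ++ b) := by simp
            have hN : (q ++ [x]).length + a.length = q.length + (x :: a).length := by
              simp only [List.length_append, List.length_cons, List.length_nil]
              omega
            rw [hL, hN]
          · rw [halt, e3]; simp
    · refine ⟨[], x :: r, ?_, by simp, ?_⟩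
      · rw [step_mismatch k f q prev cA x r hx]; simp
      · rw [altLoop_cons_ne k prev cB x r hx]; simp

-- helper: the outer loop returns L whenever the index is past the end, for any fuel
theorem outerA_stop (k : Int) (f : Nat) (L : List Int) (c p : Int) (i : Nat)
    (h : ¬ i < L.length) : outerA k f L c p i = L := by
  cases f with
  | zero => rw [outerA]
  | succ f => rw [outerA, if_neg h]

-- A's outer loop against B's altLoop, by induction on the outer fuel.
theorem main_spec (k : Int) :
    ∀ (f : Nat) (rest q : List Int) (prev : Int), rest.length + 1 ≤ f →
      outerA k f (q ++ prev :: rest) 1 prev (q.length + 1) = q ++ prev :: altLoop k prev 1 rest := by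
  intro f
  induction f with
  | zero => intro rest q prev hf; omega
  | succ m ih =>
    intro rest q prev hf
    match rest with
    | [] =>
      rw [outerA_stop k (m + 1) _ _ _ _ (by simp)]
      simp [altLoop]
    | x :: r =>
      obtain ⟨a, b, e1, e2, e3⟩ :=
        inner_spec k prev (x :: r) q ((q ++ prev :: x :: r).length + 1) 1 1
          (by simp; omega) (by simp) le_rfl (by omega) (Or.inl rfl)
      rw [outerA, if_pos (by simp)]
      rw [e1]
      cases b with
      | nil =>
        simp only [List.isEmpty_nil, List.append_nil]
        rw [outerA_stop k m _ _ _ _ (by simp; omega)]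
        rw [e3]; simp
      | cons x' t =>
        simp only [List.isEmpty_cons, Bool.false_eq_true, if_false]
        have hQ : q ++ prev :: (a ++ x' :: t) = (q ++ prev :: a) ++ x' :: t := by simp
        have hQl : q.length + a.length + 1 = (q ++ prev :: a).length := by simp; omega
        rw [hQ, hQl]
        have hg : ((q ++ prev :: a) ++ x' :: t).getD ((q ++ prev :: a).length) 0 = x' := by
          simp [List.getD_eq_getElem?_getD]
        rw [hg]
        rw [ih t (q ++ prev :: a) x' (by simp at e2 hf ⊢; omega)]
        rw [e3]; simp

-- ===== VERDICT (by name: the statement is the Claim_ definition above) =====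
theorem destructiveshortenlongruns_spec : Claim_equal_destructiveshortenlongruns := by
  intro L k _ hpre
  unfold Spec_destructiveshortenlongruns
  match L with
  | [] => exact absurd rfl hpre
  | p :: t =>
      show outerA k ((p :: t).length + 1) (p :: t) 1 p 1 = p :: altLoop k p 1 t
      have := main_spec k ((p :: t).length + 1) t [] p (by simp)
      simpa using this
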